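-- pv_equiv track=rewrite | github.com/svgbogdnn/algorithms-data-structures-IDAS_course- | [CONTEST] 1 , 2 'ИСАД АиСД-1 2526. ДЗ 1. Теория чисел'/3.py | longlive21
-- ===== SOURCE A (Python) =====
-- def longlive21(n: int):
--     cnt = [0] * (n + 1)
--     p = 2
--
--     while p <= n:
--         if cnt[p] == 0:
--             m = p
--             while m <= n:
--                 cnt[m] += 1
--                 m += p
--         p += 1
--
--     res = []
--     x = 2
--
--     while x <= n:
--         if cnt[x] >= 3:
--             res.append(x)
--         x += 1
--
--     return res
-- ===== SOURCE B (Python) =====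
-- def longlive21(n: int):
--     # smallest limit with limit*limit > n
--     limit = 1
--     while limit * limit <= n:
--         limit += 1
--     # primes below limit, by trial division against the earlier primes
--     primes = []
--     for d in range(2, limit):
--         if all(d % q for q in primes if q * q <= d):
--             primes.append(d)
--     pairs = [(p, p * p) for p in primes]
--     res = []
--     for x in range(2, n + 1):
--         y = x
--         c = 0
--         for p, sq in pairs:
--             if sq > y:
--                 break
--             if y % p == 0:
--                 c += 1
--                 while y % p == 0:
--                     y //= p
--         if y > 1:
--             c += 1
--         if c >= 3:
--             res.append(x)
--     return res
-- ===== Notes on version B (the rewrite author's own statement) =====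
-- stated objective: alternative
-- what changed: Replaced the global sieve table over 2..n (mark multiples of each prime, then scan the counts) by per-number trial-division factorization against a small list of primes up to sqrt(n), counting each number's distinct prime factors directly with no O(n) auxiliary array.
import Mathlib
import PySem

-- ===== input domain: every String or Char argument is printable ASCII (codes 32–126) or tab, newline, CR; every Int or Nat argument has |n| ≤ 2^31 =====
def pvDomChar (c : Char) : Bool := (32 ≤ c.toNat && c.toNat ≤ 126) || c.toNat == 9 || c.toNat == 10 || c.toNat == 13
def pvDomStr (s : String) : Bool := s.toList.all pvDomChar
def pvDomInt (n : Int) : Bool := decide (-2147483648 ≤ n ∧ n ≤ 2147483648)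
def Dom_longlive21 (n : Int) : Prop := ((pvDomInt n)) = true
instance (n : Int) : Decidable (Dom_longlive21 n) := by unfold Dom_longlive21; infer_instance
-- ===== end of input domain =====

-- B replaces A's global sieve array by per-number trial-division factor counting; same output, no speed claim.

-- ===== PORT A =====
-- A's loops run over nonnegative ints only (p, m, x from 2 up to n), so they are
-- transliterated on Nat; the Int argument/result are converted at the boundary.

-- inner 'while m <= n: cnt[m] += 1; m += p' (the '0 < p' conjunct is a totality guard only;
-- A always calls it with p ≥ 2)
def pvMark (n p : Nat) (cnt : Array Nat) (m : Nat) : Array Nat :=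
  if _h : m ≤ n ∧ 0 < p then pvMark n p (cnt.modify m (· + 1)) (m + p) else cnt
termination_by n + 1 - m
decreasing_by omega

-- outer 'while p <= n: if cnt[p] == 0: mark; p += 1'
def pvSieve (n : Nat) (cnt : Array Nat) (p : Nat) : Array Nat :=
  if _h : p ≤ n then
    pvSieve n (if cnt.getD p 0 = 0 then pvMark n p cnt p else cnt) (p + 1)
  else cnt
termination_by n + 1 - p
decreasing_by omega

-- 'while x <= n: if cnt[x] >= 3: res.append(x); x += 1'
def pvCollectA (n : Nat) (cnt : Array Nat) (x : Nat) (res : List Nat) : List Nat :=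
  if _h : x ≤ n then pvCollectA n cnt (x + 1) (if 3 ≤ cnt.getD x 0 then res ++ [x] else res) else res
termination_by n + 1 - x
decreasing_by omega

def longlive21 (n : Int) : List Int :=
  (pvCollectA n.toNat (pvSieve n.toNat (Array.replicate (n + 1).toNat 0) 2) 2 []).map
    (fun x => (x : Int))

-- ===== PORT B =====
-- Source B's inner 'while y % p == 0: y //= p' ('1 < p ∧ 0 < y' is a totality guard only)
def pvDivOut (p y : Nat) : Nat :=
  if h : 1 < p ∧ 0 < y ∧ y % p = 0 then pvDivOut p (y / p) else y
termination_by y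
decreasing_by exact Nat.div_lt_self h.2.1 h.1

-- Source B's 'limit = 1; while limit * limit <= n: limit += 1'
def pvLimitGo (n l : Nat) : Nat :=
  if l * l ≤ n then pvLimitGo n (l + 1) else l
termination_by n + 1 - l
decreasing_by
  rcases Nat.eq_zero_or_pos l with h0 | h0
  · omega
  · have := Nat.le_mul_of_pos_left l h0
    omega

-- body of Source B's prime-building loop: 'if all(d % q for q in primes if q * q <= d): primes.append(d)'
def pvPrimesStep (acc : List Nat) (d : Nat) : List Nat :=
  if acc.all (fun q => !(decide (q * q ≤ d)) || decide (d % q ≠ 0)) then acc ++ [d] else acc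

-- 'primes = []; for d in range(2, limit): …'
def pvPrimes (limit : Nat) : List Nat :=
  (List.range' 2 (limit - 2)).foldl pvPrimesStep []

-- Source B's 'for p, sq in pairs: …' loop with its break, then 'if y > 1: c += 1'
def pvTrial (y c : Nat) : List (Nat × Nat) → Nat
  | [] => c + (if 1 < y then 1 else 0)
  | (p, sq) :: rest =>
    if sq > y then c + (if 1 < y then 1 else 0)
    else if y % p = 0 then pvTrial (pvDivOut p y) (c + 1) rest
    else pvTrial y c rest

-- 'pairs = [(p, p * p) for p in primes]' and the final comprehension-style collection
def longlive21_alt (n : Int) : List Int :=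
  ((List.range' 2 (n.toNat - 1)).filter
      (fun x => 3 ≤ pvTrial x 0 ((pvPrimes (pvLimitGo n.toNat 1)).map (fun p => (p, p * p))))).map
    (fun x => (x : Int))

-- ===== PRECONDITION & SPEC =====

def Spec_longlive21 (n : Int) (out : List Int) : Prop := out = longlive21_alt n
instance (n : Int) (out : List Int) : Decidable (Spec_longlive21 n out) := by unfold Spec_longlive21; infer_instance

-- ===== CLAIM (what is proved, stated in full; the proofs are below) =====
def Claim_equal_longlive21 : Prop := ∀ (n : Int), Dom_longlive21 n → Spec_longlive21 n (longlive21 n)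

-- ===== LEMMAS AND PROOFS =====


-- number of primes q < k dividing m
def pvCnt (k m : Nat) : Nat := ((Finset.range k).filter (fun q => q.Prime ∧ q ∣ m)).card

theorem pvCnt_two (m : Nat) : pvCnt 2 m = 0 := by
  unfold pvCnt
  rw [Finset.card_eq_zero]
  ext q
  simp only [Finset.mem_filter, Finset.mem_range, Finset.notMem_empty, iff_false]
  rintro ⟨hq, hp, -⟩
  interval_cases q
  · exact Nat.not_prime_zero hp
  · exact Nat.not_prime_one hp

theorem pvCnt_succ (p m : Nat) :
    pvCnt (p + 1) m = pvCnt p m + (if p.Prime ∧ p ∣ m then 1 else 0) := by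
  unfold pvCnt
  rw [Finset.range_add_one, Finset.filter_insert]
  split_ifs with h
  · rw [Finset.card_insert_of_notMem (by simp)]
  · simp

theorem pvCnt_zero_iff (p : Nat) (hp : 2 ≤ p) : pvCnt p p = 0 ↔ p.Prime := by
  unfold pvCnt
  rw [Finset.card_eq_zero, Finset.filter_eq_empty_iff]
  constructor
  · intro h
    have h1 : p ≠ 1 := by omega
    have hmf := Nat.minFac_prime h1
    have hdvd := Nat.minFac_dvd p
    by_contra hnp
    have hlt : p.minFac < p := (Nat.not_prime_iff_minFac_lt hp).mp hnp
    exact h (Finset.mem_range.mpr hlt) ⟨hmf, hdvd⟩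
  · intro hpp q hq hc
    have hlt := Finset.mem_range.mp hq
    rcases (Nat.Prime.eq_one_or_self_of_dvd hpp q hc.2) with h1 | h1
    · exact Nat.not_prime_one (h1 ▸ hc.1)
    · omega

theorem pvMark_size (n p : Nat) (cnt : Array Nat) (m : Nat) :
    (pvMark n p cnt m).size = cnt.size := by
  fun_induction pvMark n p cnt m with
  | case1 cnt m h ih => rw [ih, Array.size_modify]
  | case2 => rfl

theorem getD_modify (cnt : Array Nat) (m i : Nat) (hm : m < cnt.size) :
    (cnt.modify m (· + 1)).getD i 0 = cnt.getD i 0 + (if i = m then 1 else 0) := by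
  by_cases hi : i < cnt.size
  · have hi' : i < (cnt.modify m (· + 1)).size := by rwa [Array.size_modify]
    have e1 : (cnt.modify m (· + 1)).getD i 0 = (cnt.modify m (· + 1))[i] := by
      simp [Array.getD, Array.size_modify, hi]
    have e2 : cnt.getD i 0 = cnt[i] := by simp [Array.getD, hi]
    rw [e1, e2, Array.getElem_modify hi']
    split_ifs with h1 h2 h3 <;> omega
  · have him : i ≠ m := by omega
    simp [Array.getD, Array.size_modify, hi, him]

theorem pvMark_getD (n p : Nat) (cnt : Array Nat) (m i : Nat) (hp : 0 < p)
    (hsz : n < cnt.size) :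
    (pvMark n p cnt m).getD i 0 =
      cnt.getD i 0 + (if m ≤ i ∧ i ≤ n ∧ p ∣ (i - m) then 1 else 0) := by
  fun_induction pvMark n p cnt m with
  | case1 cnt m h ih =>
    rw [ih (by rwa [Array.size_modify]),
        getD_modify cnt m i (by omega)]
    by_cases him : i = m
    · subst him
      have c1 : ¬ (i + p ≤ i ∧ i ≤ n ∧ p ∣ (i - (i + p))) := by
        rintro ⟨h1, -, -⟩; omega
      have c2 : i ≤ i ∧ i ≤ n ∧ p ∣ (i - i) := ⟨le_refl _, h.1, by simp⟩
      simp only [if_pos c2, if_neg c1]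
      simp
    · rw [if_neg him]
      congr 1
      by_cases hle : m ≤ i ∧ i ≤ n
      · have hmi : m < i := by omega
        by_cases hd : p ∣ (i - m)
        · have hpl : p ≤ i - m := Nat.le_of_dvd (by omega) hd
          have hd2 : p ∣ (i - (m + p)) := by
            have : i - (m + p) = (i - m) - p := by omega
            rw [this]; exact Nat.dvd_sub hd dvd_rfl
          rw [if_pos ⟨by omega, hle.2, hd2⟩, if_pos ⟨hle.1, hle.2, hd⟩]
        · have hd2 : ¬ (m + p ≤ i ∧ i ≤ n ∧ p ∣ (i - (m + p))) := by
            rintro ⟨h1, h2, h3⟩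
            apply hd
            have : i - m = (i - (m + p)) + p := by omega
            rw [this]; exact Nat.dvd_add h3 dvd_rfl
          rw [if_neg hd2, if_neg (by tauto)]
      · rw [if_neg (by omega), if_neg (by tauto)]
  | case2 cnt m h =>
    have : ¬ (m ≤ i ∧ i ≤ n ∧ p ∣ (i - m)) := by omega
    rw [if_neg this]
    simp

theorem pvSieve_inv (n : Nat) (cnt : Array Nat) (p : Nat) :
    n < cnt.size → 2 ≤ p →
    (∀ m, 2 ≤ m → m ≤ n → cnt.getD m 0 = pvCnt p m) →
    ∀ m, 2 ≤ m → m ≤ n → (pvSieve n cnt p).getD m 0 = pvCnt (max p (n + 1)) m := by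
  fun_induction pvSieve n cnt p with
  | case1 cnt p h ih =>
    intro hsz hp hinv m hm2 hmn
    have hmax : max (p + 1) (n + 1) = max p (n + 1) := by omega
    by_cases hz : cnt.getD p 0 = 0
    · have hprime : p.Prime := (pvCnt_zero_iff p hp).mp (by rw [← hinv p hp h]; exact hz)
      simp only [hz, dite_true, if_true] at ih ⊢
      rw [ih (by rwa [pvMark_size]) (by omega) ?_ m hm2 hmn, hmax]
      intro m hm2 hmn
      rw [pvCnt_succ, pvMark_getD n p cnt p m (by omega) hsz, hinv m hm2 hmn]
      congr 1
      by_cases hd : p ∣ m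
      · have hpm : p ≤ m := Nat.le_of_dvd (by omega) hd
        rw [if_pos ⟨hpm, hmn, by exact (Nat.dvd_sub hd dvd_rfl)⟩, if_pos ⟨hprime, hd⟩]
      · have : ¬ (p ≤ m ∧ m ≤ n ∧ p ∣ (m - p)) := by
          rintro ⟨h1, h2, h3⟩
          apply hd
          have : m = (m - p) + p := by omega
          rw [this]; exact Nat.dvd_add h3 dvd_rfl
        rw [if_neg this, if_neg (by tauto)]
    · have hnp : ¬ p.Prime := by
        intro hpp
        exact hz (by rw [hinv p hp h]; exact (pvCnt_zero_iff p hp).mpr hpp)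
      simp only [hz, dite_false, if_false] at ih ⊢
      rw [ih hsz (by omega) ?_ m hm2 hmn, hmax]
      intro m hm2 hmn
      rw [pvCnt_succ, hinv m hm2 hmn, if_neg (by tauto)]
      omega
  | case2 cnt p h =>
    intro hsz hp hinv m hm2 hmn
    have : max p (n + 1) = p := by omega
    rw [this]
    exact hinv m hm2 hmn

theorem pvDivOut_spec (p y : Nat) (hp : p.Prime) (hy : 0 < y) :
    0 < pvDivOut p y ∧ pvDivOut p y ∣ y ∧ ¬ p ∣ pvDivOut p y ∧
      ∀ q : Nat, q.Prime → q ≠ p → (q ∣ pvDivOut p y ↔ q ∣ y) := by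
  fun_induction pvDivOut p y with
  | case1 y h ih =>
    have hpd : p ∣ y := Nat.dvd_of_mod_eq_zero h.2.2
    have hy' : 0 < y / p := Nat.div_pos (Nat.le_of_dvd h.2.1 hpd) (by omega)
    obtain ⟨i1, i2, i3, i4⟩ := ih hy'
    refine ⟨i1, dvd_trans i2 (Nat.div_dvd_of_dvd hpd), i3, ?_⟩
    intro q hq hqp
    rw [i4 q hq hqp]
    constructor
    · intro hd; exact dvd_trans hd (Nat.div_dvd_of_dvd hpd)
    · intro hd
      have hco : Nat.Coprime q p := (Nat.coprime_primes hq hp).mpr hqp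
      have : y = p * (y / p) := (Nat.mul_div_cancel' hpd).symm
      exact hco.dvd_of_dvd_mul_left (this ▸ hd)
  | case2 y h =>
    have h2 : 1 < p := hp.one_lt
    refine ⟨hy, dvd_rfl, ?_, fun q _ _ => Iff.rfl⟩
    intro hd
    exact absurd (Nat.mod_eq_zero_of_dvd hd) (by tauto)

theorem pvDivOut_primeFactors (p y : Nat) (hp : p.Prime) (hy : 0 < y) :
    (pvDivOut p y).primeFactors = y.primeFactors.erase p := by
  obtain ⟨h1, h2, h3, h4⟩ := pvDivOut_spec p y hp hy
  ext q
  rw [Finset.mem_erase, Nat.mem_primeFactors, Nat.mem_primeFactors]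
  constructor
  · rintro ⟨hq, hqd, -⟩
    have hqp : q ≠ p := by rintro rfl; exact h3 hqd
    exact ⟨hqp, hq, (h4 q hq hqp).mp hqd, by omega⟩
  · rintro ⟨hqp, hq, hqd, -⟩
    exact ⟨hq, (h4 q hq hqp).mpr hqd, by omega⟩

theorem pvDivOut_le (p y : Nat) : pvDivOut p y ≤ y := by
  fun_induction pvDivOut p y with
  | case1 y h ih => exact le_trans ih (Nat.div_le_self _ _)
  | case2 => exact le_refl _

theorem pvLimitGo_gt (n l : Nat) : n < pvLimitGo n l * pvLimitGo n l := by
  fun_induction pvLimitGo n l with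
  | case1 l h ih => exact ih
  | case2 l h => omega

theorem pvBuild_inv (j : Nat) :
    (List.range' 2 j).foldl pvPrimesStep [] =
      (List.range' 2 j).filter (fun d => decide (Nat.Prime d)) := by
  induction j with
  | zero => simp
  | succ j ih =>
    rw [List.range'_concat, List.foldl_append, List.filter_append, ih]
    simp only [Nat.one_mul]
    have hmem : ∀ q, q ∈ (List.range' 2 j).filter (fun d => decide (Nat.Prime d)) →
        (q.Prime ∧ 2 ≤ q ∧ q < 2 + j) := by
      intro q hq
      rw [List.mem_filter, List.mem_range'_1] at hq
      refine ⟨by simpa using hq.2, hq.1.1, by omega⟩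
    simp only [List.foldl_cons, List.foldl_nil]
    unfold pvPrimesStep
    by_cases hp : Nat.Prime (2 + j)
    · rw [if_pos ?_]
      · simp [hp]
      · rw [List.all_eq_true]
        intro q hq
        obtain ⟨hqp, hq2, hqlt⟩ := hmem q hq
        by_cases hqq : q * q ≤ 2 + j
        · simp only [hqq, decide_true, Bool.not_true, Bool.false_or, decide_eq_true_eq]
          intro hmod
          have hd : q ∣ 2 + j := Nat.dvd_of_mod_eq_zero hmod
          rcases hp.eq_one_or_self_of_dvd q hd with h1 | h1 <;> omega
        · simp [hqq]
    · rw [if_neg ?_]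
      · simp [hp]
      · intro hall
        rw [List.all_eq_true] at hall
        have hne1 : 2 + j ≠ 1 := by omega
        have hmfp := Nat.minFac_prime hne1
        have hmfd := Nat.minFac_dvd (2 + j)
        have hlt : (2 + j).minFac < 2 + j :=
          (Nat.not_prime_iff_minFac_lt (by omega)).mp hp
        have hsq : (2 + j).minFac * (2 + j).minFac ≤ 2 + j := by
          have := Nat.minFac_sq_le_self (show 0 < 2 + j by omega) hp
          rwa [pow_two] at this
        have hmem2 : (2 + j).minFac ∈ (List.range' 2 j).filter (fun d => decide (Nat.Prime d)) := by
          rw [List.mem_filter, List.mem_range'_1]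
          exact ⟨⟨hmfp.two_le, by omega⟩, by simpa using hmfp⟩
        have := hall _ hmem2
        simp only [hsq, decide_true, Bool.not_true, Bool.false_or, decide_eq_true_eq] at this
        exact this (Nat.mod_eq_zero_of_dvd hmfd)

theorem pvPrimes_mem (L q : Nat) : q ∈ pvPrimes L ↔ q.Prime ∧ q < L := by
  unfold pvPrimes
  rw [pvBuild_inv, List.mem_filter, List.mem_range'_1]
  constructor
  · rintro ⟨⟨h1, h2⟩, hp⟩
    exact ⟨by simpa using hp, by omega⟩
  · rintro ⟨hp, hlt⟩
    have h2 := hp.two_le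
    exact ⟨⟨h2, by omega⟩, by simpa using hp⟩

theorem pvPrimes_sorted (L : Nat) : List.Pairwise (· < ·) (pvPrimes L) := by
  unfold pvPrimes
  rw [pvBuild_inv]
  exact List.Pairwise.filter _ (List.pairwise_lt_range' 1)

theorem omega_card_of_big_factors (y : Nat) (hy : 0 < y)
    (h : ∀ q : Nat, q.Prime → q ∣ y → y < q * q) :
    y.primeFactors.card = if 1 < y then 1 else 0 := by
  by_cases h1 : 1 < y
  · rw [if_pos h1]
    have hmf := Nat.minFac_prime (show y ≠ 1 by omega)
    have hmfd := Nat.minFac_dvd y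
    have hyp : y.Prime := by
      by_contra hnp
      have h2 : y.minFac * y.minFac ≤ y := by
        have := Nat.minFac_sq_le_self (show 0 < y by omega) hnp
        rwa [pow_two] at this
      have := h y.minFac hmf hmfd
      omega
    rw [Nat.Prime.primeFactors hyp]
    simp
  · rw [if_neg h1]
    have : y = 1 := by omega
    subst this
    simp

theorem pvTrial_spec : ∀ (ps : List Nat) (y c : Nat), 0 < y →
    List.Pairwise (· < ·) ps → (∀ q ∈ ps, Nat.Prime q) →
    (∀ q : Nat, q.Prime → q ∣ y → q ∈ ps ∨ y < q * q) →
    pvTrial y c (ps.map (fun p => (p, p * p))) = c + y.primeFactors.card := by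
  intro ps
  induction ps with
  | nil =>
    intro y c hy _ _ hfac
    simp only [List.map_nil, pvTrial]
    rw [omega_card_of_big_factors y hy ?_]
    intro q hq hd
    rcases hfac q hq hd with h | h
    · exact absurd h (List.not_mem_nil)
    · exact h
  | cons p ps ih =>
    intro y c hy hsort hprime hfac
    have hp : p.Prime := hprime p (by simp)
    have hrest := (List.pairwise_cons.mp hsort)
    simp only [List.map_cons, pvTrial]
    by_cases hbr : p * p > y
    · rw [if_pos hbr, omega_card_of_big_factors y hy ?_]
      intro q hq hd
      rcases hfac q hq hd with h | h
      · rcases List.mem_cons.mp h with h1 | h1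
        · subst h1; exact hbr
        · have hpq : p < q := hrest.1 q h1
          have : p * p < q * q := by nlinarith
          omega
      · exact h
    · rw [if_neg hbr]
      by_cases hdvd : y % p = 0
      · rw [if_pos hdvd]
        have hpd : p ∣ y := Nat.dvd_of_mod_eq_zero hdvd
        obtain ⟨d1, d2, d3, d4⟩ := pvDivOut_spec p y hp hy
        rw [ih (pvDivOut p y) (c + 1) d1 hrest.2 (fun q hq => hprime q (List.mem_cons_of_mem p hq)) ?_]
        · have hmem : p ∈ y.primeFactors := Nat.mem_primeFactors.mpr ⟨hp, hpd, by omega⟩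
          rw [pvDivOut_primeFactors p y hp hy, Finset.card_erase_of_mem hmem]
          have : 0 < y.primeFactors.card := Finset.card_pos.mpr ⟨p, hmem⟩
          omega
        · intro q hq hd
          have hdy : q ∣ y := dvd_trans hd d2
          rcases hfac q hq hdy with h | h
          · rcases List.mem_cons.mp h with h1 | h1
            · subst h1; exact absurd hd d3
            · exact Or.inl h1
          · exact Or.inr (by have h2 := pvDivOut_le p y; omega)
      · rw [if_neg hdvd]
        apply ih y c hy hrest.2 (fun q hq => hprime q (List.mem_cons_of_mem p hq))
        intro q hq hd
        rcases hfac q hq hd with h | h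
        · rcases List.mem_cons.mp h with h1 | h1
          · subst h1; exact absurd (Nat.mod_eq_zero_of_dvd hd) hdvd
          · exact Or.inl h1
        · exact Or.inr h

theorem pvCnt_eq_primeFactors (n m : Nat) (hm : 2 ≤ m) (hmn : m ≤ n) :
    pvCnt (n + 1) m = m.primeFactors.card := by
  unfold pvCnt
  congr 1
  ext q
  rw [Finset.mem_filter, Finset.mem_range, Nat.mem_primeFactors]
  constructor
  · rintro ⟨-, hq, hd⟩; exact ⟨hq, hd, by omega⟩
  · rintro ⟨hq, hd, -⟩
    exact ⟨by have := Nat.le_of_dvd (by omega) hd; omega, hq, hd⟩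

theorem pvCollectA_eq (n : Nat) (cnt : Array Nat) (x : Nat) (res : List Nat) :
    pvCollectA n cnt x res =
      res ++ (List.range' x (n + 1 - x)).filter (fun m => 3 ≤ cnt.getD m 0) := by
  fun_induction pvCollectA n cnt x res with
  | case1 x res h ih =>
    rw [show n + 1 - x = (n - x) + 1 by omega, List.range'_succ, List.filter_cons]
    by_cases hc : 3 ≤ cnt.getD x 0
    · simp only [hc, dite_true, if_true] at ih ⊢
      rw [ih, show n + 1 - (x + 1) = n - x by omega]
      simp
    · simp only [hc, dite_false, if_false] at ih ⊢
      rw [ih, show n + 1 - (x + 1) = n - x by omega]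
      simp
  | case2 x res h =>
    have : n + 1 - x = 0 := by omega
    rw [this]
    simp

-- ===== VERDICT (by name: the statement is the Claim_ definition above) =====
-- ===== VERDICT (by name: the statement is the Claim_ definition above) =====
theorem longlive21_spec : Claim_equal_longlive21 := by
  intro n _
  unfold Spec_longlive21 longlive21 longlive21_alt
  set N := n.toNat with hN
  by_cases hn2 : 2 ≤ N
  · have hsz : (Array.replicate (n + 1).toNat 0).size = N + 1 := by
      rw [Array.size_replicate]; omega
    have hinv0 : ∀ m, 2 ≤ m → m ≤ N →
        (Array.replicate (n + 1).toNat (0 : Nat)).getD m 0 = pvCnt 2 m := by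
      intro m _ _
      rw [pvCnt_two]
      simp [Array.getD]
    have hfin := pvSieve_inv N (Array.replicate (n + 1).toNat 0) 2 (by omega) (le_refl _) hinv0
    have hcnt : N + 1 - 2 = N - 1 := by omega
    have hfilter :
        List.filter (fun m => decide (3 ≤ (pvSieve N (Array.replicate (n + 1).toNat 0) 2).getD m 0))
            (List.range' 2 (N - 1)) =
          List.filter
            (fun x => decide (3 ≤ pvTrial x 0 ((pvPrimes (pvLimitGo N 1)).map (fun p => (p, p * p)))))
            (List.range' 2 (N - 1)) := by
      apply List.filter_congr
      intro m hm
      rw [List.mem_range'_1] at hm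
      have hm2 : 2 ≤ m := hm.1
      have hmn : m ≤ N := by omega
      have hmax : max 2 (N + 1) = N + 1 := by omega
      have hL := pvLimitGo_gt N 1
      have htr : pvTrial m 0 ((pvPrimes (pvLimitGo N 1)).map (fun p => (p, p * p))) =
          0 + m.primeFactors.card := by
        apply pvTrial_spec (pvPrimes (pvLimitGo N 1)) m 0 (by omega) (pvPrimes_sorted _)
          (fun q hq => ((pvPrimes_mem _ q).mp hq).1)
        intro q hq hd
        by_cases hqq : q * q ≤ m
        · left
          apply (pvPrimes_mem _ q).mpr
          refine ⟨hq, ?_⟩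
          by_contra hqL
          have hqL2 : pvLimitGo N 1 ≤ q := by omega
          have : pvLimitGo N 1 * pvLimitGo N 1 ≤ q * q := Nat.mul_le_mul hqL2 hqL2
          omega
        · right; omega
      rw [hfin m hm2 hmn, hmax, pvCnt_eq_primeFactors N m hm2 hmn, htr]
      simp
    rw [pvCollectA_eq, hcnt, List.nil_append, hfilter]
  · rw [pvCollectA_eq, show N + 1 - 2 = 0 by omega, show N - 1 = 0 by omega]
    simp
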